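-- pv_equiv track=rewrite | github.com/walzate/python-for-beginners | ciphers.py | montessori
-- ===== SOURCE A (Python) =====
-- def get_next_character_in_list (character, dict):
--     index = dict.find(character)
--     if index >= 0 and (index + 1) <= len(dict)-1:
--         result = dict[index + 1]
--     elif index == len(dict)-1:
--         result = dict[0]
--     else:
--         result = character
--     return result
--
-- def montessori(text):
--     vocals = 'aeiou'
--     consonants = 'bcdfghjklmnpqrstvwxyz'
--     text_list = list(text.lower())
--     text_cyphered = ''
--     for character in text_list:
--         if vocals.find(character) >= 0:
--             text_cyphered = text_cyphered + str(get_next_character_in_list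
--         (character,vocals))
--         elif consonants.find(character) >= 0:
--             text_cyphered = text_cyphered + str(get_next_character_in_list
--         (character,consonants))
--         else:
--             text_cyphered = text_cyphered + character
--     return text_cyphered
-- ===== SOURCE B (Python) =====
-- def montessori(text):
--     # Different algorithm: instead of indexing into the group strings, scan the
--     # alphabet cyclically from the character's successor until a letter of the
--     # same vowel/consonant class is found; non-letters pass through unchanged.
--     def is_vowel(c):
--         return c in 'aeiou'
--     out = []
--     for c in text.lower():
--         if 'a' <= c <= 'z':
--             v = is_vowel(c)
--             d = chr((ord(c) - 97 + 1) % 26 + 97)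
--             while is_vowel(d) != v:
--                 d = chr((ord(d) - 97 + 1) % 26 + 97)
--             out.append(d)
--         else:
--             out.append(c)
--     return ''.join(out)
-- ===== Notes on version B (the rewrite author's own statement) =====
-- stated objective: alternative
-- what changed: B drops the group strings and the index helper: it classifies each lowered letter as vowel/consonant and walks the alphabet cyclically from the letter's successor until it reaches a letter of the same class (correct because each fixed group is exactly the letters of one class in alphabetical order, so the cyclic next same-class letter is the next element of the group with wraparound); non-letters pass through unchanged.
import Mathlib
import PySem

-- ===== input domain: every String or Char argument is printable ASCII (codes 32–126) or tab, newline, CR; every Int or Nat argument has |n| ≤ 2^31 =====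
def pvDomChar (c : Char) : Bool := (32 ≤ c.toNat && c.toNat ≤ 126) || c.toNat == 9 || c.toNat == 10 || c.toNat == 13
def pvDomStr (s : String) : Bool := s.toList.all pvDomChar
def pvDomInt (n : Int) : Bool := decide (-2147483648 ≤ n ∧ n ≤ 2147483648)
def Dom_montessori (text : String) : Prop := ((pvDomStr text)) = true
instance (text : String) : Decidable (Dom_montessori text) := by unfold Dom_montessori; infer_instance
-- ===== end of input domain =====

-- B replaces the group-string indexing by a cyclic alphabet scan: it steps
-- through the alphabet from a letter's successor until it meets a letter of
-- the same vowel/consonant class (an 'alternative' same-cost algorithm).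

-- ===== PORT A =====
def get_next_character_in_list (character : Char) (dict : List Char) : Char :=
  let index := PySem.Chars.find dict [character]
  if index ≥ 0 ∧ index + 1 ≤ (dict.length : Int) - 1 then
    PySem.List.pyGetD dict (index + 1) character
  else if index = (dict.length : Int) - 1 then
    PySem.List.pyGetD dict 0 character
  else
    character

def montessori (text : String) : String :=
  let vocals : List Char := "aeiou".toList
  let consonants : List Char := "bcdfghjklmnpqrstvwxyz".toList
  let text_list : List Char := (PySem.Str.lower text).toList
  String.ofList (text_list.foldl (fun acc character =>
    if PySem.Chars.find vocals [character] ≥ 0 then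
      acc ++ [get_next_character_in_list character vocals]
    else if PySem.Chars.find consonants [character] ≥ 0 then
      acc ++ [get_next_character_in_list character consonants]
    else
      acc ++ [character]) [])

-- ===== PORT B =====
-- is_vowel(c): c in 'aeiou'
def pvIsVowel (c : Char) : Bool := decide (c ∈ "aeiou".toList)

-- d = chr((ord(d) - 97 + 1) % 26 + 97)
def pvSucc26 (c : Char) : Char := Char.ofNat ((c.toNat - 97 + 1) % 26 + 97)

-- the while-loop 'while is_vowel(d) != v: d = succ(d)', with fuel 26
-- (within the guard 'a' ≤ c ≤ 'z' the loop stops after < 26 steps)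
def pvScan : Nat → Bool → Char → Char
  | 0, _, d => d
  | n + 1, v, d => if pvIsVowel d ≠ v then pvScan n v (pvSucc26 d) else d

def montessori_alt (text : String) : String :=
  String.ofList ((PySem.Str.lower text).toList.foldl (fun out c =>
    if 'a' ≤ c ∧ c ≤ 'z' then
      out ++ [pvScan 26 (pvIsVowel c) (pvSucc26 c)]
    else
      out ++ [c]) [])

-- ===== PRECONDITION & SPEC =====
def Spec_montessori (text : String) (out : String) : Prop := out = montessori_alt text
instance (text : String) (out : String) : Decidable (Spec_montessori text out) := by unfold Spec_montessori; infer_instance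

-- ===== CLAIM (what is proved, stated in full; the proofs are below) =====
def Claim_equal_montessori : Prop := ∀ (text : String), Dom_montessori text → Spec_montessori text (montessori text)

-- ===== LEMMAS AND PROOFS =====

-- A's per-character result, factored for the proof
def perA (c : Char) : Char :=
  if PySem.Chars.find "aeiou".toList [c] ≥ 0 then
    get_next_character_in_list c "aeiou".toList
  else if PySem.Chars.find "bcdfghjklmnpqrstvwxyz".toList [c] ≥ 0 then
    get_next_character_in_list c "bcdfghjklmnpqrstvwxyz".toList
  else c

-- B's per-character result
def perB (c : Char) : Char :=
  if 'a' ≤ c ∧ c ≤ 'z' then pvScan 26 (pvIsVowel c) (pvSucc26 c) else c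

set_option maxRecDepth 4096 in
lemma per_eq_small : ∀ n : Nat, n < 128 → perA (Char.ofNat n) = perB (Char.ofNat n) := by decide

lemma perA_eq_perB (c : Char) (h : c.toNat < 128) : perA c = perB c := by
  have := per_eq_small c.toNat h
  rwa [Char.ofNat_toNat] at this

set_option maxRecDepth 4096 in
lemma lowerChar_lt_128 : ∀ n : Nat, n < 128 → (PySem.Chars.lowerChar (Char.ofNat n)).toNat < 128 := by decide

theorem montessori_spec : Claim_equal_montessori := by
  unfold Claim_equal_montessori Spec_montessori montessori montessori_alt
  intro text hdom
  simp only []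
  rw [show (fun (acc : List Char) character =>
      if PySem.Chars.find "aeiou".toList [character] ≥ 0 then
        acc ++ [get_next_character_in_list character "aeiou".toList]
      else if PySem.Chars.find "bcdfghjklmnpqrstvwxyz".toList [character] ≥ 0 then
        acc ++ [get_next_character_in_list character "bcdfghjklmnpqrstvwxyz".toList]
      else acc ++ [character]) = (fun acc c => acc ++ [perA c]) from by
        funext acc c; simp only [perA]; split_ifs <;> rfl]
  rw [show (fun (out : List Char) c =>
      if 'a' ≤ c ∧ c ≤ 'z' then out ++ [pvScan 26 (pvIsVowel c) (pvSucc26 c)]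
      else out ++ [c]) = (fun out c => out ++ [perB c]) from by
        funext out c; simp only [perB]; split_ifs <;> rfl]
  rw [PySem.List.foldl_append_singleton_eq_map, PySem.List.foldl_append_singleton_eq_map]
  congr 1
  simp only [List.nil_append]
  apply List.map_congr_left
  intro c hc
  apply perA_eq_perB
  rw [PySem.Str.toList_lower] at hc
  rcases List.mem_map.mp hc with ⟨c0, hc0, rfl⟩
  have hd : pvDomChar c0 = true := by
    have := (List.all_eq_true.mp hdom) c0 hc0
    exact this
  have h0 : c0.toNat < 128 := by
    simp [pvDomChar] at hd
    omega
  have := lowerChar_lt_128 c0.toNat h0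
  rwa [Char.ofNat_toNat] at this
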